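-- pv_equiv track=rewrite | github.com/pypi-data/pypi-mirror-396 | packages/jnkn/jnkn-0.0.0rc5.tar.gz/jnkn-0.0.0rc5/src/jnkn/parsing/pyspark/column_lineage.py | _split_sql_columns
-- ===== SOURCE A (Python) =====
-- from typing import Any, Dict, List, Tuple
--
-- def _split_sql_columns(select_clause: str) -> List[str]:
--     """Split SELECT clause by commas, respecting parentheses."""
--     columns = []
--     current = []
--     depth = 0
--
--     for char in select_clause:
--         if char == "(":
--             depth += 1
--             current.append(char)
--         elif char == ")":
--             depth -= 1
--             current.append(char)
--         elif char == "," and depth == 0: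
--             columns.append("".join(current).strip())
--             current = []
--         else:
--             current.append(char)
--
--     if current:
--         columns.append("".join(current).strip())
--
--     return columns
-- ===== SOURCE B (Python) =====
-- from typing import List
--
--
-- def _split_sql_columns(select_clause: str) -> List[str]:
--     """Split SELECT clause by commas, respecting parentheses."""
--     parts = select_clause.split(",")
--     columns = []
--     buf = []
--     depth = 0
--     for i, part in enumerate(parts):
--         buf.append(part)
--         depth += part.count("(") - part.count(")")
--         if depth == 0 and i < len(parts) - 1:
--             columns.append(",".join(buf).strip())
--             buf = []
--     tail = ",".join(buf)
--     if tail: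
--         columns.append(tail.strip())
--     return columns
-- ===== Notes on version B (the rewrite author's own statement) =====
-- stated objective: faster
-- what changed: B replaces A's character-by-character state machine by splitting the string on every comma and then merging the chunks back with a running parenthesis depth computed per chunk via count/join, emitting the joined stripped buffer whenever the cumulative depth is 0 before the last chunk.
import Mathlib
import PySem

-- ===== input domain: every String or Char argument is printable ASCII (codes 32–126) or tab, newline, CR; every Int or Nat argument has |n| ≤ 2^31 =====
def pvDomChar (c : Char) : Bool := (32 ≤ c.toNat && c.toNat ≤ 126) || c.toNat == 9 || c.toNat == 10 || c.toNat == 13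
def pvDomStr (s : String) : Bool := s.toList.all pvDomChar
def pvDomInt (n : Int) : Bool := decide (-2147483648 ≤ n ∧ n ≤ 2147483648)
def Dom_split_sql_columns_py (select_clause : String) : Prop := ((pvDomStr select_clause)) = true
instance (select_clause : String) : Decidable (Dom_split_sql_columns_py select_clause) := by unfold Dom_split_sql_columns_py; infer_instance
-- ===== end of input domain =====

-- B replaces A's per-character scan by split-on-comma + per-chunk paren counting (same O(n), measurably faster constant factor via bulk string ops).


-- ===== PORT A =====
-- A: one pass over the characters, state (columns, current, depth).
def pvStepA (st : List String × List Char × Int) (char : Char) :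
    List String × List Char × Int :=
  let (columns, current, depth) := st
  if char == '(' then (columns, current ++ [char], depth + 1)
  else if char == ')' then (columns, current ++ [char], depth - 1)
  else if char == ',' && depth == 0 then
    (columns ++ [PySem.Str.strip (String.ofList current)], [], depth)
  else (columns, current ++ [char], depth)

def pvFinalA (st : List String × List Char × Int) : List String :=
  if st.2.1 ≠ [] then st.1 ++ [PySem.Str.strip (String.ofList st.2.1)] else st.1

def split_sql_columns_py (select_clause : String) : List String :=
  pvFinalA (select_clause.toList.foldl pvStepA ([], [], 0))

-- ===== PORT B =====
-- B: split on every comma, buffer chunks, track depth by per-chunk paren counts,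
-- emit ','.join(buf).strip() when depth returns to 0 before the last chunk.
def pvStepB (n : Int) (st : List String × List String × Int) (ip : Int × String) :
    List String × List String × Int :=
  let (columns, buf0, depth0) := st
  let buf := buf0 ++ [ip.2]
  let depth := depth0 + (PySem.Str.count ip.2 "(" : Int) - (PySem.Str.count ip.2 ")" : Int)
  if depth == 0 && decide (ip.1 < n - 1) then
    (columns ++ [PySem.Str.strip (PySem.Str.join "," buf)], [], depth)
  else (columns, buf, depth)

def pvFinalB (st : List String × List String × Int) : List String :=
  let tail := PySem.Str.join "," st.2.1
  if tail ≠ "" then st.1 ++ [PySem.Str.strip tail] else st.1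

def split_sql_columns_py_alt (select_clause : String) : List String :=
  -- select_clause.split(",") : the separator "," is non-empty, so split? is always `some`
  let parts := (PySem.Str.split? select_clause ",").getD []
  pvFinalB ((PySem.List.enumerate parts).foldl (pvStepB (parts.length : Int)) ([], [], 0))

-- ===== PRECONDITION & SPEC =====
def Spec_split_sql_columns_py (select_clause : String) (out : List String) : Prop := out = split_sql_columns_py_alt select_clause
instance (select_clause : String) (out : List String) : Decidable (Spec_split_sql_columns_py select_clause out) := by unfold Spec_split_sql_columns_py; infer_instance

-- ===== CLAIM (what is proved, stated in full; the proofs are below) =====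
def Claim_equal_split_sql_columns_py : Prop := ∀ (select_clause : String), Dom_split_sql_columns_py select_clause → Spec_split_sql_columns_py select_clause (split_sql_columns_py select_clause)

-- ===== LEMMAS AND PROOFS =====

/-- Reference splitting on every comma (what Python's s.split(",") computes). -/
def pvCommaSplit : List Char → List (List Char)
  | [] => [[]]
  | c :: rest =>
    if c = ',' then [] :: pvCommaSplit rest
    else
      match pvCommaSplit rest with
      | [] => [[c]]
      | p :: ps => (c :: p) :: ps

lemma pvCommaSplit_ne_nil (cs : List Char) : pvCommaSplit cs ≠ [] := by
  cases cs with
  | nil => simp [pvCommaSplit]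
  | cons c rest =>
    simp only [pvCommaSplit]
    split_ifs with h
    · simp
    · cases hr : pvCommaSplit rest <;> simp

lemma pvCommaSplit_comma (rest : List Char) :
    pvCommaSplit (',' :: rest) = [] :: pvCommaSplit rest := by
  simp [pvCommaSplit]

lemma pvCommaSplit_other (c : Char) (rest : List Char) (h : c ≠ ',')
    (p : List Char) (ps : List (List Char)) (hr : pvCommaSplit rest = p :: ps) :
    pvCommaSplit (c :: rest) = (c :: p) :: ps := by
  simp [pvCommaSplit, h, hr]

def pvModHead (f : List Char → List Char) : List (List Char) → List (List Char)
  | [] => []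
  | p :: ps => f p :: ps

lemma pv_go_comma (fuel : ℕ) : ∀ (l cur : List Char) (acc : List (List Char)), l.length < fuel →
    PySem.Chars.splitOn.go [','] fuel l cur acc
      = acc.reverse ++ pvModHead (fun p => cur.reverse ++ p) (pvCommaSplit l) := by
  induction fuel with
  | zero => intro l cur acc h; omega
  | succ fuel ih =>
    intro l cur acc h
    cases l with
    | nil => simp [PySem.Chars.splitOn.go, pvCommaSplit, pvModHead]
    | cons c rest =>
      by_cases hc : c = ','
      · subst hc
        rw [show PySem.Chars.splitOn.go [','] (fuel+1) (','::rest) cur acc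
              = PySem.Chars.splitOn.go [','] fuel rest [] (cur.reverse :: acc) from by
            simp [PySem.Chars.splitOn.go, List.isPrefixOf]]
        rw [ih rest [] (cur.reverse :: acc) (by simpa using Nat.lt_of_succ_lt_succ h)]
        cases hr : pvCommaSplit rest with
        | nil => exact absurd hr (pvCommaSplit_ne_nil rest)
        | cons p ps => simp [pvCommaSplit, hr, pvModHead]
      · rw [show PySem.Chars.splitOn.go [','] (fuel+1) (c::rest) cur acc
              = PySem.Chars.splitOn.go [','] fuel rest (c :: cur) acc from by
            simp [PySem.Chars.splitOn.go, List.isPrefixOf, Ne.symm hc]]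
        rw [ih rest (c :: cur) acc (by simpa using Nat.lt_of_succ_lt_succ h)]
        cases hr : pvCommaSplit rest with
        | nil => exact absurd hr (pvCommaSplit_ne_nil rest)
        | cons p ps => simp [pvCommaSplit, hc, hr, pvModHead]

lemma pv_split?_comma (cs : List Char) :
    PySem.Chars.split? cs [','] = some (pvCommaSplit cs) := by
  simp only [PySem.Chars.split?, PySem.Chars.splitOn, List.isEmpty]
  rw [pv_go_comma (cs.length + 1) cs [] [] (by omega)]
  cases hr : pvCommaSplit cs with
  | nil => exact absurd hr (pvCommaSplit_ne_nil cs)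
  | cons p ps => simp [pvModHead]

lemma pv_str_split (s : String) :
    PySem.Str.split? s "," = some ((pvCommaSplit s.toList).map String.ofList) := by
  have h := PySem.Str.split?_map s ","
  rw [show (",":String).toList = [','] from rfl, pv_split?_comma] at h
  cases hs : PySem.Str.split? s "," with
  | none => rw [hs] at h; simp at h
  | some l =>
    rw [hs] at h
    simp only [Option.map_some, Option.some_inj] at h
    have : l = (l.map String.toList).map String.ofList := by
      simp [List.map_map, Function.comp_def, String.ofList_toList]
    rw [this, h]

lemma pv_count_go (c : Char) (fuel : ℕ) : ∀ (l : List Char) (acc : ℕ), l.length ≤ fuel →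
    PySem.Chars.count.go [c] fuel l acc = acc + l.count c := by
  induction fuel with
  | zero =>
    intro l acc h
    have : l = [] := List.length_eq_zero_iff.mp (Nat.le_zero.mp h)
    subst this; simp [PySem.Chars.count.go]
  | succ fuel ih =>
    intro l acc h
    cases l with
    | nil => simp [PySem.Chars.count.go]
    | cons a rest =>
      by_cases hc : c = a
      · subst hc
        rw [show PySem.Chars.count.go [c] (fuel+1) (c::rest) acc
              = PySem.Chars.count.go [c] fuel rest (acc + 1) from by
            simp [PySem.Chars.count.go, List.isPrefixOf]]
        rw [ih rest (acc+1) (by simpa using h)]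
        simp
        omega
      · rw [show PySem.Chars.count.go [c] (fuel+1) (a::rest) acc
              = PySem.Chars.count.go [c] fuel rest acc from by
            simp [PySem.Chars.count.go, List.isPrefixOf, hc]]
        rw [ih rest acc (by simpa using h)]
        simp [Ne.symm hc]

lemma pv_count_single (s : List Char) (c : Char) :
    PySem.Chars.count s [c] = s.count c := by
  have := pv_count_go c s.length s 0 (le_refl _)
  simpa [PySem.Chars.count] using this

/-- join with "," -/
def pvJ : List (List Char) → List Char
  | [] => []
  | [p] => p
  | p :: ps => p ++ ',' :: pvJ ps

/-- every chunk followed by a comma -/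
def pvT : List (List Char) → List Char
  | [] => []
  | p :: ps => p ++ ',' :: pvT ps

lemma pvJ_cons_of_ne (x : List Char) (l : List (List Char)) (h : l ≠ []) :
    pvJ (x :: l) = x ++ ',' :: pvJ l := by
  cases l with
  | nil => exact absurd rfl h
  | cons y t => rfl

lemma pvJ_eq (l : List (List Char)) : PySem.Chars.join [','] l = pvJ l := by
  induction l with
  | nil => rfl
  | cons x t ih =>
    cases t with
    | nil => simp [PySem.Chars.join, List.intercalate, pvJ]
    | cons y t' =>
      rw [pvJ_cons_of_ne x (y::t') (by simp), ← ih]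
      simp [PySem.Chars.join, List.intercalate, List.intersperse]

lemma pvJ_snoc (xs : List (List Char)) (p : List Char) :
    pvJ (xs ++ [p]) = pvT xs ++ p := by
  induction xs with
  | nil => rfl
  | cons x t ih =>
    rw [List.cons_append, pvJ_cons_of_ne x (t ++ [p]) (by simp), ih]
    simp [pvT]

lemma pvT_snoc (xs : List (List Char)) (p : List Char) :
    pvT (xs ++ [p]) = pvT xs ++ p ++ [','] := by
  induction xs with
  | nil => rfl
  | cons x t ih => simp [pvT, ih]

lemma pvJ_commaSplit (cs : List Char) : pvJ (pvCommaSplit cs) = cs := by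
  induction cs with
  | nil => rfl
  | cons c rest ih =>
    by_cases hc : c = ','
    · subst hc
      rw [pvCommaSplit_comma, pvJ_cons_of_ne [] _ (pvCommaSplit_ne_nil rest), ih]
      rfl
    · cases hr : pvCommaSplit rest with
      | nil => exact absurd hr (pvCommaSplit_ne_nil rest)
      | cons p ps =>
        rw [pvCommaSplit_other c rest hc p ps hr]
        rw [hr] at ih
        cases ps with
        | nil => simpa [pvJ] using congrArg (c :: ·) ih
        | cons q t =>
          rw [pvJ_cons_of_ne (c::p) (q::t) (by simp)]
          rw [pvJ_cons_of_ne p (q::t) (by simp)] at ih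
          simp_all

lemma pvCommaSplit_no_comma (cs : List Char) :
    ∀ p ∈ pvCommaSplit cs, (',' : Char) ∉ p := by
  induction cs with
  | nil => simp [pvCommaSplit]
  | cons c rest ih =>
    by_cases hc : c = ','
    · subst hc
      rw [pvCommaSplit_comma]
      intro p hp
      rcases List.mem_cons.mp hp with hp | hp
      · simp [hp]
      · exact ih p hp
    · cases hr : pvCommaSplit rest with
      | nil => exact absurd hr (pvCommaSplit_ne_nil rest)
      | cons p ps =>
        rw [pvCommaSplit_other c rest hc p ps hr]
        intro q hq
        rcases List.mem_cons.mp hq with hq | hq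
        · subst hq
          intro hmem
          rcases List.mem_cons.mp hmem with hmem | hmem
          · exact hc hmem.symm
          · exact ih p (hr ▸ List.mem_cons_self) hmem
        · exact ih q (hr ▸ List.mem_cons_of_mem p hq)

lemma pv_afold_nocomma (p : List Char) (hp : (',' : Char) ∉ p) :
    ∀ (cols : List String) (cur : List Char) (d : Int),
    p.foldl pvStepA (cols, cur, d)
      = (cols, cur ++ p, d + (p.count '(' : Int) - (p.count ')' : Int)) := by
  induction p with
  | nil => intro cols cur d; simp
  | cons c rest ih =>
    intro cols cur d
    have hc : c ≠ ',' := fun h => hp (h ▸ List.mem_cons_self)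
    have hrest : (',' : Char) ∉ rest := fun h => hp (List.mem_cons_of_mem c h)
    by_cases h1 : c = '('
    · subst h1
      rw [List.foldl_cons, show pvStepA (cols, cur, d) '(' = (cols, cur ++ ['('], d + 1) from by
            simp [pvStepA]]
      rw [ih hrest cols (cur ++ ['(']) (d+1)]
      simp
      omega
    · by_cases h2 : c = ')'
      · subst h2
        rw [List.foldl_cons, show pvStepA (cols, cur, d) ')' = (cols, cur ++ [')'], d - 1) from by
              simp [pvStepA]]
        rw [ih hrest cols (cur ++ [')']) (d-1)]
        simp
        omega
      · rw [List.foldl_cons, show pvStepA (cols, cur, d) c = (cols, cur ++ [c], d) from by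
              simp [pvStepA, h1, h2, hc]]
        rw [ih hrest cols (cur ++ [c]) d]
        simp [h1, h2]

lemma pv_ne_empty (s : String) : (s ≠ "") ↔ s.toList ≠ [] := by
  constructor <;> intro h h2 <;> apply h
  · exact String.toList_inj.mp (by simp [h2])
  · simp [h2]

lemma pv_join_toList (buf : List String) :
    (PySem.Str.join "," buf).toList = pvJ (buf.map String.toList) := by
  rw [PySem.Str.toList_join, show (",":String).toList = [','] from rfl, pvJ_eq]

lemma pv_main (n : Int) : ∀ (parts : List String) (k : Int) (cols buf : List String) (d : Int),
    parts ≠ [] → (∀ p ∈ parts, (',' : Char) ∉ p.toList) → k + parts.length = n →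
    pvFinalA ((pvJ (parts.map String.toList)).foldl pvStepA (cols, pvT (buf.map String.toList), d))
      = pvFinalB ((PySem.List.enumerate parts k).foldl (pvStepB n) (cols, buf, d)) := by
  intro parts
  induction parts with
  | nil => intro k cols buf d hne; exact absurd rfl hne
  | cons p rest ih =>
    intro k cols buf d _ hfree hk
    have hpfree : (',' : Char) ∉ p.toList := hfree p List.mem_cons_self
    have hcnt1 : PySem.Chars.count p.toList ['('] = p.toList.count '(' := pv_count_single _ _
    have hcnt2 : PySem.Chars.count p.toList [')'] = p.toList.count ')' := pv_count_single _ _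
    have hjoin : PySem.Str.strip (PySem.Str.join "," (buf ++ [p]))
        = PySem.Str.strip (String.ofList (pvT (buf.map String.toList) ++ p.toList)) := by
      apply String.toList_inj.mp
      rw [PySem.Str.toList_strip, PySem.Str.toList_strip, pv_join_toList]
      simp only [List.map_append, List.map_cons, List.map_nil, pvJ_snoc, String.toList_ofList]
    cases rest with
    | nil =>
      -- last chunk: B never emits inside the loop; tails compared
      have hk1 : ¬ (k < n - 1) := by simp at hk; omega
      simp only [List.map_cons, List.map_nil, pvJ]
      rw [pv_afold_nocomma p.toList hpfree]
      rw [show PySem.List.enumerate [p] k = [(k, p)] from by simp [PySem.List.enumerate]]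
      rw [List.foldl_cons, List.foldl_nil,
          show pvStepB n (cols, buf, d) (k, p) = (cols, buf ++ [p],
            d + (PySem.Str.count p "(" : Int) - (PySem.Str.count p ")" : Int)) from by
          simp [pvStepB, hk1]]
      simp only [pvFinalA, pvFinalB]
      have htl : (PySem.Str.join "," (buf ++ [p])).toList
          = pvT (buf.map String.toList) ++ p.toList := by
        rw [pv_join_toList]; simp [pvJ_snoc]
      by_cases hne : pvT (buf.map String.toList) ++ p.toList = []
      · rw [if_neg (by simp [hne]), if_neg (by simp [pv_ne_empty, htl, hne])]
      · rw [if_pos (by simp [hne]), if_pos (by simp [pv_ne_empty, htl, hne])]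
        rw [hjoin]
    | cons q rest' =>
      have hrest : (q :: rest').map String.toList ≠ [] := by simp
      rw [List.map_cons, pvJ_cons_of_ne _ _ hrest, List.foldl_append,
          pv_afold_nocomma p.toList hpfree, List.foldl_cons]
      rw [show PySem.List.enumerate (p :: q :: rest') k
            = (k, p) :: PySem.List.enumerate (q :: rest') (k + 1) from by
          simp [PySem.List.enumerate]]
      rw [List.foldl_cons]
      have hk1 : k < n - 1 := by simp at hk; omega
      set d' := d + (p.toList.count '(' : Int) - (p.toList.count ')' : Int) with hd'
      by_cases hd0 : d' = 0
      · rw [show pvStepA (cols, pvT (buf.map String.toList) ++ p.toList, d') ','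
              = (cols ++ [PySem.Str.strip (String.ofList (pvT (buf.map String.toList) ++ p.toList))],
                 ([] : List Char), d') from by simp [pvStepA, hd0]]
        rw [show pvStepB n (cols, buf, d) (k, p)
              = (cols ++ [PySem.Str.strip (PySem.Str.join "," (buf ++ [p]))], ([] : List String), d') from by
            simp [pvStepB, hcnt1, hcnt2, ← hd', hd0, hk1]]
        rw [hjoin]
        have := ih (k+1)
          (cols ++ [PySem.Str.strip (String.ofList (pvT (buf.map String.toList) ++ p.toList))])
          [] d' (by simp) (fun r hr => hfree r (List.mem_cons_of_mem p hr)) (by simp at hk ⊢; omega)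
        simpa [pvT] using this
      · rw [show pvStepA (cols, pvT (buf.map String.toList) ++ p.toList, d') ','
              = (cols, pvT (buf.map String.toList) ++ p.toList ++ [','], d') from by
            simp [pvStepA, hd0]]
        rw [show pvStepB n (cols, buf, d) (k, p) = (cols, buf ++ [p], d') from by
            simp [pvStepB, hcnt1, hcnt2, ← hd', hd0]]
        have := ih (k+1) cols (buf ++ [p]) d' (by simp)
          (fun r hr => hfree r (List.mem_cons_of_mem p hr)) (by simp at hk ⊢; omega)
        rw [List.map_append, List.map_cons, List.map_nil, pvT_snoc] at this
        simpa using this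

-- ===== VERDICT (by name: the statement is the Claim_ definition above) =====
theorem split_sql_columns_py_spec : Claim_equal_split_sql_columns_py := by
  intro s _
  unfold Spec_split_sql_columns_py split_sql_columns_py split_sql_columns_py_alt
  rw [pv_str_split]
  set parts := (pvCommaSplit s.toList).map String.ofList with hparts
  have hmap : parts.map String.toList = pvCommaSplit s.toList := by
    simp [hparts, List.map_map, Function.comp_def, String.toList_ofList]
  have hs : s.toList = pvJ (parts.map String.toList) := by
    rw [hmap, pvJ_commaSplit]
  rw [hs]
  have := pv_main (parts.length : Int) parts 0 [] [] 0
    (by simp [hparts]; exact pvCommaSplit_ne_nil s.toList)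
    (by
      intro p hp
      rw [hparts] at hp
      rcases List.mem_map.mp hp with ⟨q, hq, rfl⟩
      rw [String.toList_ofList]
      exact pvCommaSplit_no_comma s.toList q hq)
    (by simp)
  simpa [pvT] using this
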